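-- pv_equiv track=rewrite | github.com/weiyangzen/awesome_algorithms | Algorithms/数学-动态规划-0547-矩阵快速幂优化DP/demo.py | dp_tribonacci_mod
-- ===== SOURCE A (Python) =====
-- MOD_DEFAULT = 1_000_000_007
--
-- def validate_inputs(n: int, mod: int) -> None:
--     """Validate scalar inputs for recurrence computation."""
--     if not isinstance(n, int):
--         raise TypeError(f"n must be int, got {type(n).__name__}")
--     if not isinstance(mod, int):
--         raise TypeError(f"mod must be int, got {type(mod).__name__}")
--     if n < 0:
--         raise ValueError("n must be non-negative")
--     if mod <= 0:
--         raise ValueError("mod must be positive")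
--
-- def dp_tribonacci_mod(n: int, mod: int = MOD_DEFAULT) -> int:
--     """O(n) baseline DP for f(n)=f(n-1)+f(n-2)+f(n-3)."""
--     validate_inputs(n, mod)
--
--     if n == 0:
--         return 0
--     if n == 1 or n == 2:
--         return 1
--
--     f0, f1, f2 = 0, 1, 1
--     for _ in range(3, n + 1):
--         f0, f1, f2 = f1, f2, (f0 + f1 + f2) % mod
--     return f2
-- ===== SOURCE B (Python) =====
-- MOD_DEFAULT = 1_000_000_007
--
-- def dp_tribonacci_mod(n: int, mod: int = MOD_DEFAULT) -> int:
--     """O(log n) f(n)=f(n-1)+f(n-2)+f(n-3) mod `mod` via 3x3 matrix fast power."""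
--     if n == 0:
--         return 0
--     if n == 1 or n == 2:
--         return 1
--
--     def mat_mul(X, Y):
--         return [[(X[i][0] * Y[0][j] + X[i][1] * Y[1][j] + X[i][2] * Y[2][j]) % mod
--                  for j in range(3)] for i in range(3)]
--
--     R = [[1, 0, 0], [0, 1, 0], [0, 0, 1]]
--     M = [[1, 1, 1], [1, 0, 0], [0, 1, 0]]
--     e = n - 2
--     while e:
--         if e & 1:
--             R = mat_mul(R, M)
--         M = mat_mul(M, M)
--         e >>= 1
--     # f(n) = first row of M^(n-2) applied to (f(2), f(1), f(0)) = (1, 1, 0)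
--     return (R[0][0] + R[0][1]) % mod
-- ===== Notes on version B (the rewrite author's own statement) =====
-- stated objective: faster
-- what changed: Replaced the O(n) sliding-window DP loop by 3x3 matrix exponentiation by squaring modulo mod, so the answer is computed in O(log n) multiplications.
-- outside the precondition, e.g. on dp_tribonacci_mod(1, 0): A raises ValueError, B returns 1; on dp_tribonacci_mod(5, 0): A raises ValueError, B raises ZeroDivisionError
import Mathlib
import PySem

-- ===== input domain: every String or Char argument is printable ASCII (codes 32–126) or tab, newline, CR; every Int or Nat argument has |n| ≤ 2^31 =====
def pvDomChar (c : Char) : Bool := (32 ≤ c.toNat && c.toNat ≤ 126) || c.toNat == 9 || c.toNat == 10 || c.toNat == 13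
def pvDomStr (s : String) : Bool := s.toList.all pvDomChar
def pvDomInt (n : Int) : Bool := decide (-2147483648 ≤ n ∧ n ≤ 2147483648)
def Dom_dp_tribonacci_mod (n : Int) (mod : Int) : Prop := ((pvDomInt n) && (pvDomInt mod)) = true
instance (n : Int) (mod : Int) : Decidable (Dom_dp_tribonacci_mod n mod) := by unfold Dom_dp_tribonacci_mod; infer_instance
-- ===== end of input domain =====

-- B replaces A's O(n) sliding-window loop by 3x3 matrix exponentiation by squaring (O(log n)); identical results on Pre_.

-- ===== PORT A =====
-- the loop body: f0, f1, f2 = f1, f2, (f0 + f1 + f2) % mod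
def pvStepA (mod : Int) (st : Int × Int × Int) (_ : Int) : Int × Int × Int :=
  (st.2.1, st.2.2, PySem.Int.mod (st.1 + st.2.1 + st.2.2) mod)

def dp_tribonacci_mod (n : Int) (mod : Int) : Int :=
  if n = 0 then 0
  else if n = 1 ∨ n = 2 then 1
  else
    let s := (PySem.List.pyRange 3 (n + 1) 1).foldl (pvStepA mod) (0, 1, 1)
    s.2.2

-- ===== PORT B =====
-- a 3x3 integer matrix: rows (a b c), (d e f), (g h i)
structure Mat3 where
  a : Int
  b : Int
  c : Int
  d : Int
  e : Int
  f : Int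
  g : Int
  h : Int
  i : Int
deriving DecidableEq, Repr

-- mat_mul in Source B: each entry (row·col) % mod
def matMulm (mo : Int) (X Y : Mat3) : Mat3 :=
  ⟨PySem.Int.mod (X.a * Y.a + X.b * Y.d + X.c * Y.g) mo,
   PySem.Int.mod (X.a * Y.b + X.b * Y.e + X.c * Y.h) mo,
   PySem.Int.mod (X.a * Y.c + X.b * Y.f + X.c * Y.i) mo,
   PySem.Int.mod (X.d * Y.a + X.e * Y.d + X.f * Y.g) mo,
   PySem.Int.mod (X.d * Y.b + X.e * Y.e + X.f * Y.h) mo,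
   PySem.Int.mod (X.d * Y.c + X.e * Y.f + X.f * Y.i) mo,
   PySem.Int.mod (X.g * Y.a + X.h * Y.d + X.i * Y.g) mo,
   PySem.Int.mod (X.g * Y.b + X.h * Y.e + X.i * Y.h) mo,
   PySem.Int.mod (X.g * Y.c + X.h * Y.f + X.i * Y.i) mo⟩

def Mat3I : Mat3 := ⟨1, 0, 0, 0, 1, 0, 0, 0, 1⟩
def Mat3T : Mat3 := ⟨1, 1, 1, 1, 0, 0, 0, 1, 0⟩

-- the while-loop of Source B: while e: if e&1: R=R*M; M=M*M; e>>=1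
def tribFast (mo : Int) (M R : Mat3) (e : Nat) : Mat3 :=
  if e = 0 then R
  else tribFast mo (matMulm mo M M) (if e % 2 = 1 then matMulm mo R M else R) (e / 2)
termination_by e
decreasing_by omega

def dp_tribonacci_mod_alt (n : Int) (mod : Int) : Int :=
  if n = 0 then 0
  else if n = 1 ∨ n = 2 then 1
  else
    let R := tribFast mod Mat3T Mat3I (n - 2).toNat
    PySem.Int.mod (R.a + R.b) mod

-- ===== PRECONDITION & SPEC =====
-- A raises ValueError when n < 0 or mod ≤ 0 (validate_inputs); those inputs are excluded.
def Pre_dp_tribonacci_mod (n : Int) (mod : Int) : Prop := 0 ≤ n ∧ 0 < mod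
instance (n : Int) (mod : Int) : Decidable (Pre_dp_tribonacci_mod n mod) := by
  unfold Pre_dp_tribonacci_mod; infer_instance

def pvWitness_dp_tribonacci_mod : Int × Int := (5, 7)

def Spec_dp_tribonacci_mod (n : Int) (mod : Int) (out : Int) : Prop := out = dp_tribonacci_mod_alt n mod
instance (n : Int) (mod : Int) (out : Int) : Decidable (Spec_dp_tribonacci_mod n mod out) := by
  unfold Spec_dp_tribonacci_mod; infer_instance

-- ===== CLAIM (what is proved, stated in full; the proofs are below) =====
def Claim_equal_dp_tribonacci_mod : Prop := ∀ (n : Int) (mod : Int), Dom_dp_tribonacci_mod n mod → Pre_dp_tribonacci_mod n mod → Spec_dp_tribonacci_mod n mod (dp_tribonacci_mod n mod)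

-- ===== LEMMAS AND PROOFS =====

-- reference tribonacci sequence (no modulus)
def trib : Nat → Int
  | 0 => 0
  | 1 => 1
  | 2 => 1
  | (k + 3) => trib (k + 2) + trib (k + 1) + trib k

-- the A-side state components: exact values held by (f0, f1, f2)
def hmod (m : Int) : Nat → Int
  | 0 => 0
  | 1 => 1
  | 2 => 1
  | (k + 3) => trib (k + 3) % m

theorem hmod_modEq (m : Int) (j : Nat) : Int.ModEq m (hmod m j) (trib j) := by
  match j with
  | 0 => rfl
  | 1 => rfl
  | 2 => rfl
  | (k + 3) =>
    show (trib (k + 3) % m) % m = trib (k + 3) % m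
    exact Int.emod_emod_of_dvd _ dvd_rfl

theorem foldA (m : Int) (hm : 0 < m) (k : Nat) :
    (PySem.List.pyRange 3 ((k : Int) + 3) 1).foldl (pvStepA m) (0, 1, 1)
      = (hmod m k, hmod m (k + 1), hmod m (k + 2)) := by
  induction k with
  | zero =>
    rw [PySem.List.pyRange_one_eq_nil (by norm_num)]
    rfl
  | succ k ih =>
    have hcast : ((k + 1 : Nat) : Int) + 3 = ((k : Int) + 3) + 1 := by push_cast; ring
    have hsplit : PySem.List.pyRange 3 (((k : Int) + 3) + 1) 1
        = PySem.List.pyRange 3 ((k : Int) + 3) 1 ++ [(k : Int) + 3] :=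
      PySem.List.pyRange_one_succ_right (by omega)
    rw [hcast, hsplit, List.foldl_append, ih]
    simp only [List.foldl_cons, List.foldl_nil]
    unfold pvStepA
    simp only [Prod.mk.injEq]
    refine ⟨trivial, trivial, ?_⟩
    show PySem.Int.mod (hmod m k + hmod m (k + 1) + hmod m (k + 2)) m = hmod m (k + 3)
    rw [PySem.Int.mod_eq_emod_of_pos hm]
    have : Int.ModEq m (hmod m k + hmod m (k + 1) + hmod m (k + 2))
        (trib k + trib (k + 1) + trib (k + 2)) :=
      ((hmod_modEq m k).add (hmod_modEq m (k + 1))).add (hmod_modEq m (k + 2))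
    calc (hmod m k + hmod m (k + 1) + hmod m (k + 2)) % m
        = (trib k + trib (k + 1) + trib (k + 2)) % m := this
      _ = trib (k + 3) % m := by rw [show trib (k + 3) = trib (k + 2) + trib (k + 1) + trib k from rfl]; ring_nf
      _ = hmod m (k + 3) := rfl

theorem dpA_eq (n m : Int) (hm : 0 < m) (k : Nat) (hn : n = (k : Int) + 3) :
    dp_tribonacci_mod n m = trib (k + 3) % m := by
  subst hn
  unfold dp_tribonacci_mod
  rw [if_neg (by omega), if_neg (by omega)]
  have : (k : Int) + 3 + 1 = ((k + 1 : Nat) : Int) + 3 := by push_cast; ring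
  simp only [this, foldA m hm (k + 1)]
  rfl

-- exact (unreduced) matrix product and powers
def matMulI (X Y : Mat3) : Mat3 :=
  ⟨X.a * Y.a + X.b * Y.d + X.c * Y.g,
   X.a * Y.b + X.b * Y.e + X.c * Y.h,
   X.a * Y.c + X.b * Y.f + X.c * Y.i,
   X.d * Y.a + X.e * Y.d + X.f * Y.g,
   X.d * Y.b + X.e * Y.e + X.f * Y.h,
   X.d * Y.c + X.e * Y.f + X.f * Y.i,
   X.g * Y.a + X.h * Y.d + X.i * Y.g,
   X.g * Y.b + X.h * Y.e + X.i * Y.h,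
   X.g * Y.c + X.h * Y.f + X.i * Y.i⟩

def powI (M : Mat3) : Nat → Mat3
  | 0 => Mat3I
  | (e + 1) => matMulI (powI M e) M

theorem matMulI_one (X : Mat3) : matMulI X Mat3I = X := by
  cases X; simp [matMulI, Mat3I]

theorem one_matMulI (X : Mat3) : matMulI Mat3I X = X := by
  cases X; simp [matMulI, Mat3I]

theorem matMulI_assoc (X Y Z : Mat3) : matMulI (matMulI X Y) Z = matMulI X (matMulI Y Z) := by
  cases X; cases Y; cases Z
  simp only [matMulI, Mat3.mk.injEq]
  and_intros <;> ring

theorem powI_add (M : Mat3) (x y : Nat) : powI M (x + y) = matMulI (powI M x) (powI M y) := by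
  induction y with
  | zero => simp [powI, matMulI_one]
  | succ y ih => rw [show x + (y + 1) = (x + y) + 1 from rfl]
                 simp [powI, ih, matMulI_assoc]

theorem powI_double (M : Mat3) (k : Nat) : powI (matMulI M M) k = powI M (2 * k) := by
  induction k with
  | zero => rfl
  | succ k ih =>
    have h2 : powI M 2 = matMulI M M := by simp [powI, one_matMulI]
    calc powI (matMulI M M) (k + 1)
        = matMulI (powI (matMulI M M) k) (matMulI M M) := rfl
      _ = matMulI (powI M (2 * k)) (powI M 2) := by rw [ih, h2]
      _ = powI M (2 * k + 2) := (powI_add M (2 * k) 2).symm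
      _ = powI M (2 * (k + 1)) := by ring_nf

theorem matMulI_powI (M : Mat3) (k : Nat) : matMulI M (powI M k) = powI M (1 + k) := by
  rw [powI_add]
  congr 1
  simp [powI, one_matMulI]

-- entrywise congruence mod m
def MEq (m : Int) (X Y : Mat3) : Prop :=
  Int.ModEq m X.a Y.a ∧ Int.ModEq m X.b Y.b ∧ Int.ModEq m X.c Y.c ∧
  Int.ModEq m X.d Y.d ∧ Int.ModEq m X.e Y.e ∧ Int.ModEq m X.f Y.f ∧
  Int.ModEq m X.g Y.g ∧ Int.ModEq m X.h Y.h ∧ Int.ModEq m X.i Y.i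

theorem MEq_refl (m : Int) (X : Mat3) : MEq m X X :=
  ⟨rfl, rfl, rfl, rfl, rfl, rfl, rfl, rfl, rfl⟩

theorem emod_modEq (m s : Int) : Int.ModEq m (s % m) s :=
  Int.emod_emod_of_dvd _ dvd_rfl

theorem matMulm_congr (m : Int) (hm : 0 < m) {X X' Y Y' : Mat3}
    (hX : MEq m X X') (hY : MEq m Y Y') : MEq m (matMulm m X Y) (matMulI X' Y') := by
  obtain ⟨x1, x2, x3, x4, x5, x6, x7, x8, x9⟩ := hX
  obtain ⟨y1, y2, y3, y4, y5, y6, y7, y8, y9⟩ := hY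
  refine ⟨?_, ?_, ?_, ?_, ?_, ?_, ?_, ?_, ?_⟩ <;>
    · show Int.ModEq m (PySem.Int.mod _ m) _
      rw [PySem.Int.mod_eq_emod_of_pos hm]
      refine (emod_modEq m _).trans ?_
      exact ((Int.ModEq.mul ‹_› ‹_›).add (Int.ModEq.mul ‹_› ‹_›)).add (Int.ModEq.mul ‹_› ‹_›)

theorem tribFast_congr (m : Int) (hm : 0 < m) :
    ∀ (e : Nat) (M R M' R' : Mat3), MEq m M M' → MEq m R R' →
      MEq m (tribFast m M R e) (matMulI R' (powI M' e)) := by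
  intro e
  induction e using Nat.strong_induction_on with
  | _ e ih =>
    intro M R M' R' hM hR
    rw [tribFast]
    by_cases he : e = 0
    · subst he
      simpa [powI, matMulI_one] using hR
    · rw [if_neg he]
      have hR' : MEq m (if e % 2 = 1 then matMulm m R M else R)
          (if e % 2 = 1 then matMulI R' M' else R') := by
        by_cases h : e % 2 = 1
        · simpa [h] using matMulm_congr m hm hR hM
        · simpa [h] using hR
      have key := ih (e / 2) (by omega) (matMulm m M M)
        (if e % 2 = 1 then matMulm m R M else R) (matMulI M' M')
        (if e % 2 = 1 then matMulI R' M' else R') (matMulm_congr m hm hM hM) hR'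
      rw [powI_double] at key
      by_cases h : e % 2 = 1
      · simp only [if_pos h] at key ⊢
        rw [matMulI_assoc, matMulI_powI, show 1 + 2 * (e / 2) = e from by omega] at key
        exact key
      · simp only [if_neg h] at key ⊢
        rwa [show 2 * (e / 2) = e from by omega] at key

-- the first row of Mat3T^(k+1)
theorem powT_row (k : Nat) :
    (powI Mat3T (k + 1)).a = trib (k + 2) ∧
    (powI Mat3T (k + 1)).b = trib (k + 1) + trib k ∧
    (powI Mat3T (k + 1)).c = trib (k + 1) := by
  induction k with
  | zero =>
    refine ⟨?_, ?_, ?_⟩ <;> simp [powI, one_matMulI, Mat3T, trib]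
  | succ k ih =>
    obtain ⟨ha, hb, hc⟩ := ih
    have htr : trib (k + 3) = trib (k + 2) + trib (k + 1) + trib k := rfl
    refine ⟨?_, ?_, ?_⟩
    · show (matMulI (powI Mat3T (k + 1)) Mat3T).a = trib (k + 3)
      simp only [matMulI]
      rw [ha, hb, hc, htr]
      simp only [Mat3T]; ring
    · show (matMulI (powI Mat3T (k + 1)) Mat3T).b = trib (k + 2) + trib (k + 1)
      simp only [matMulI]
      rw [ha, hc]
      simp only [Mat3T]; ring
    · show (matMulI (powI Mat3T (k + 1)) Mat3T).c = trib (k + 2)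
      simp only [matMulI]
      rw [ha]
      simp only [Mat3T]; ring

theorem dpB_eq (n m : Int) (hm : 0 < m) (k : Nat) (hn : n = (k : Int) + 3) :
    dp_tribonacci_mod_alt n m = trib (k + 3) % m := by
  subst hn
  unfold dp_tribonacci_mod_alt
  rw [if_neg (by omega), if_neg (by omega)]
  have he : ((k : Int) + 3 - 2).toNat = k + 1 := by omega
  simp only [he]
  have hcong := tribFast_congr m hm (k + 1) Mat3T Mat3I Mat3T Mat3I
    (MEq_refl m Mat3T) (MEq_refl m Mat3I)
  rw [one_matMulI] at hcong
  obtain ⟨ha, hb, _⟩ := hcong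
  obtain ⟨ra, rb, _⟩ := powT_row k
  show PySem.Int.mod ((tribFast m Mat3T Mat3I (k + 1)).a + (tribFast m Mat3T Mat3I (k + 1)).b) m = _
  rw [PySem.Int.mod_eq_emod_of_pos hm]
  calc ((tribFast m Mat3T Mat3I (k + 1)).a + (tribFast m Mat3T Mat3I (k + 1)).b) % m
      = ((powI Mat3T (k + 1)).a + (powI Mat3T (k + 1)).b) % m := Int.ModEq.add ha hb
    _ = trib (k + 3) % m := by
        rw [ra, rb, show trib (k + 3) = trib (k + 2) + trib (k + 1) + trib k from rfl]
        ring_nf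

-- ===== VERDICT (by name: the statement is the Claim_ definition above) =====
theorem dp_tribonacci_mod_spec : Claim_equal_dp_tribonacci_mod := by
  intro n m _ hpre
  obtain ⟨hn, hm⟩ := hpre
  unfold Spec_dp_tribonacci_mod
  by_cases h0 : n = 0
  · subst h0; rfl
  · by_cases h12 : n = 1 ∨ n = 2
    · unfold dp_tribonacci_mod dp_tribonacci_mod_alt
      rw [if_neg h0, if_pos h12, if_neg h0, if_pos h12]
    · have h3 : 3 ≤ n := by omega
      have hk : n = ((n - 3).toNat : Int) + 3 := by omega
      rw [dpA_eq n m hm (n - 3).toNat hk, dpB_eq n m hm (n - 3).toNat hk]
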